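-- pv_equiv track=rewrite | github.com/blubass/Funky-Moose-AKM-Flow- | app_workflows/loudness_workflows.py | summarize_analysis_results
-- ===== SOURCE A (Python) =====
-- def summarize_analysis_results(results):
--     return {
--         "total": len(results),
--         "ok_count": sum(1 for item in results if item.get("ok")),
--         "warn_count": sum(
--             1 for item in results if item.get("match_status") == "Peak Warnung"
--         ),
--     }
-- ===== SOURCE B (Python) =====
-- def summarize_analysis_results(results):
--     # Joint four-bucket histogram: classify each item by (ok-truthy, peak-warning),
--     # tally, then derive all three outputs arithmetically from the buckets.
--     hist = {}
--     for item in results: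
--         key = (bool(item.get("ok")), item.get("match_status") == "Peak Warnung")
--         hist[key] = hist.get(key, 0) + 1
--     ff = hist.get((False, False), 0)
--     ft = hist.get((False, True), 0)
--     tf = hist.get((True, False), 0)
--     tt = hist.get((True, True), 0)
--     return {"total": ff + ft + tf + tt, "ok_count": tf + tt, "warn_count": ft + tt}
-- ===== Notes on version B (the rewrite author's own statement) =====
-- stated objective: alternative
-- what changed: A takes len(results) and two independent generator-expression sums; B builds a four-bucket joint histogram keyed by (ok-truthy, peak-warning) in a dict and derives total, ok_count and warn_count arithmetically from the bucket tallies (no len, no per-predicate scan).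
import Mathlib
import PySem

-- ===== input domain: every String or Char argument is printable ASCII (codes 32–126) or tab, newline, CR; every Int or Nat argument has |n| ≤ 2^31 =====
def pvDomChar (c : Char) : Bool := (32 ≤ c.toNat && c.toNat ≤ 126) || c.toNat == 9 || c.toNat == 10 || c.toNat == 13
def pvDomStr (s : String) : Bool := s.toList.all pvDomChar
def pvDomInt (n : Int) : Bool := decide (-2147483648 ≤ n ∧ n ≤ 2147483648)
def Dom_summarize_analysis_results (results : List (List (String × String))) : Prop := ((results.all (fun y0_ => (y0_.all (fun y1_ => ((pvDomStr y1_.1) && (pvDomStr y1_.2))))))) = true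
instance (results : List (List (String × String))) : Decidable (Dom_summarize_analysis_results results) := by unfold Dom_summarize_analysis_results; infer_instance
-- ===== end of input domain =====

-- B replaces A's len + two independent generator sums by a four-bucket joint histogram
-- (dict keyed by the two flags) from which all three outputs are derived; objective: alternative.

-- ===== PORT A =====
-- item.get(k): first-match lookup in the association list (Python dict)
def pvGet (item : List (String × String)) (k : String) : Option String :=
  (PySem.Dict.mk item).get? k

-- truthiness of item.get("ok"): some nonempty string
def pvOkTruthy (item : List (String × String)) : Bool :=
  match pvGet item "ok" with
  | some s => !(s == "")
  | none => false

def pvWarn (item : List (String × String)) : Bool :=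
  pvGet item "match_status" == some "Peak Warnung"

def summarize_analysis_results (results : List (List (String × String))) : List (String × Int) :=
  [("total", (results.length : Int)),
   ("ok_count", ((results.countP pvOkTruthy : Nat) : Int)),
   ("warn_count", ((results.countP pvWarn : Nat) : Int))]

-- ===== PORT B =====
-- key = (bool(item.get("ok")), item.get("match_status") == "Peak Warnung")
def pvClassify (item : List (String × String)) : Bool × Bool :=
  (pvOkTruthy item, pvWarn item)

-- hist[key] = hist.get(key, 0) + 1, looped over results; then the four bucket reads
def summarize_analysis_results_alt (results : List (List (String × String))) : List (String × Int) :=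
  let hist : PySem.Dict (Bool × Bool) Int :=
    results.foldl (fun d item => d.insert (pvClassify item) (d.getD (pvClassify item) 0 + 1))
      PySem.Dict.empty
  let ff := hist.getD (false, false) 0
  let ft := hist.getD (false, true) 0
  let tf := hist.getD (true, false) 0
  let tt := hist.getD (true, true) 0
  [("total", ff + ft + tf + tt), ("ok_count", tf + tt), ("warn_count", ft + tt)]

-- ===== PRECONDITION & SPEC =====
def Spec_summarize_analysis_results (results : List (List (String × String))) (out : List (String × Int)) : Prop := out = summarize_analysis_results_alt results
instance (results : List (List (String × String))) (out : List (String × Int)) : Decidable (Spec_summarize_analysis_results results out) := by unfold Spec_summarize_analysis_results; infer_instance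

-- ===== CLAIM (what is proved, stated in full; the proofs are below) =====
def Claim_equal_summarize_analysis_results : Prop := ∀ (results : List (List (String × String))), Dom_summarize_analysis_results results → Spec_summarize_analysis_results results (summarize_analysis_results results)

-- ===== LEMMAS AND PROOFS =====
-- B's histogram read at a bucket is the count of that classification
theorem pv_hist_getD (results : List (List (String × String))) (key : Bool × Bool) :
    (results.foldl (fun d item => d.insert (pvClassify item) (d.getD (pvClassify item) 0 + 1))
        (PySem.Dict.empty : PySem.Dict (Bool × Bool) Int)).getD key 0
      = ((results.countP (fun item => pvClassify item == key) : Nat) : Int) := by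
  have h : results.foldl
      (fun d item => d.insert (pvClassify item) (d.getD (pvClassify item) 0 + 1))
      (PySem.Dict.empty : PySem.Dict (Bool × Bool) Int)
      = (results.map pvClassify).foldl (fun d x => d.insert x (d.getD x 0 + 1)) PySem.Dict.empty := by
    rw [List.foldl_map]
  rw [h, PySem.Dict.getD_foldl_insert_add_one, PySem.Dict.getD_empty, List.count_eq_countP,
    List.countP_map]
  simp [Function.comp_def]

-- the four buckets partition the list, and the relevant buckets sum to the predicate counts
theorem pv_buckets (results : List (List (String × String))) :
    (results.countP (fun i => pvClassify i == (false, false))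
      + results.countP (fun i => pvClassify i == (false, true))
      + results.countP (fun i => pvClassify i == (true, false))
      + results.countP (fun i => pvClassify i == (true, true)) = results.length)
    ∧ (results.countP (fun i => pvClassify i == (true, false))
      + results.countP (fun i => pvClassify i == (true, true)) = results.countP pvOkTruthy)
    ∧ (results.countP (fun i => pvClassify i == (false, true))
      + results.countP (fun i => pvClassify i == (true, true)) = results.countP pvWarn) := by
  induction results with
  | nil => simp
  | cons x xs ih =>
    obtain ⟨h1, h2, h3⟩ := ih
    simp only [pvClassify] at h1 h2 h3 ⊢
    by_cases ho : pvOkTruthy x <;> by_cases hw : pvWarn x <;>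
      simp [ho, hw, Prod.ext_iff] <;> omega

-- ===== VERDICT (by name: the statement is the Claim_ definition above) =====
theorem summarize_analysis_results_spec : Claim_equal_summarize_analysis_results := by
  intro results _
  unfold Spec_summarize_analysis_results summarize_analysis_results summarize_analysis_results_alt
  obtain ⟨h1, h2, h3⟩ := pv_buckets results
  simp only [pv_hist_getD]
  push_cast
  rw [← h1, ← h2, ← h3]
  push_cast
  ring_nf
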